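-- pv_equiv track=rewrite | github.com/mchensd/pythonAlgsAndDS | DivideAndConquer/black_white_marbles.py | sort_marbles
-- ===== SOURCE A (Python) =====
-- import copy
--
-- def sort_marbles(pattern, swaps):
--     if len(pattern) == 1:
--         return pattern, swaps
--
--     else:
--         mid = len(pattern) // 2
--         left_pattern, swaps = sort_marbles(pattern[0: mid], swaps)
--         right_pattern, swaps = sort_marbles(pattern[mid:], swaps)
--         pattern = left_pattern + right_pattern
--         # Checks for cases where we need to swap consecutive w's and b's in the middle
--         if pattern[mid] == 'w' and pattern[mid-1] == 'b':  # need this line to filter out cases like 'bbb'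
--             swapped_pat = copy.copy(pattern)
--             b_count = 0
--             w_count = 0
--             for i in range(len(pattern[0: mid])):
--                 if pattern[i] == 'b':  # b's need to be placed in the later half
--                     b_count += 1
--                     swapped_pat.remove('b')
--                     swapped_pat.append('b')
--             for i in range(mid, len(pattern)):
--                 if pattern[i] == 'w':  # w's should already be in the beginning half
--                     w_count += 1
--             # Number of swaps required will be the consecutive w's in the middle * consecutive b's in the middle
--             swaps += w_count * b_count
--             return swapped_pat, swaps
--         return pattern, swaps
-- ===== SOURCE B (Python) =====
-- def sort_marbles(pattern, swaps):
--     # Iterative post-order stack machine over the same split tree; the merge step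
--     # uses count/filter instead of A's repeated list.remove scans.
--     def merge_seg(left, right):
--         if right[0] == 'w' and left[-1] == 'b':
--             bc = left.count('b')
--             wc = right.count('w')
--             return [x for x in left if x != 'b'] + right + ['b'] * bc, wc * bc
--         return left + right, 0
--
--     total = swaps
--     tasks = [("go", pattern)]
--     res = []
--     while tasks:
--         t = tasks.pop()
--         if t[0] == "go":
--             seg = t[1]
--             if len(seg) <= 1:
--                 res.append(seg)
--             else:
--                 mid = len(seg) // 2
--                 tasks.append(("merge", None))
--                 tasks.append(("go", seg[mid:]))
--                 tasks.append(("go", seg[:mid]))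
--         else:
--             right = res.pop()
--             left = res.pop()
--             merged, inc = merge_seg(left, right)
--             total += inc
--             res.append(merged)
--     return res[-1], total
-- ===== Notes on version B (the rewrite author's own statement) =====
-- stated objective: faster
-- what changed: The recursive divide-and-conquer with a merge step that rescans the list via repeated list.remove calls is replaced by an explicit-stack post-order traversal of the same split tree whose merge step is a single count/filter pass.
import Mathlib
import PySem

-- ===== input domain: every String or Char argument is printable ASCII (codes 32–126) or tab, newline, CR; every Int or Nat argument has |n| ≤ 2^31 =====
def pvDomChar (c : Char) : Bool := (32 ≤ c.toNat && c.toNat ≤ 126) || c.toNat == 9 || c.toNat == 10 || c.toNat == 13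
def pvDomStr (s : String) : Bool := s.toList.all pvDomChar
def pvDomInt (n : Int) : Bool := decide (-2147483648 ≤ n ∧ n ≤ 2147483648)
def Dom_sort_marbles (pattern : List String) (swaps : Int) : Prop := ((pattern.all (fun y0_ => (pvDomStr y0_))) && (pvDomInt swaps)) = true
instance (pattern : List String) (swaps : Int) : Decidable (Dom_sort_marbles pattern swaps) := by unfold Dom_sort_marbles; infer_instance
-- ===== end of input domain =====

-- B replaces A's recursion + remove-scan merge by an explicit-stack post-order
-- traversal whose merge step is one count/filter pass (same return value).

-- ===== PORT A =====
-- A recurses on list slices; the recursion is not structural, so the port takes a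
-- fuel argument and the wrapper passes fuel = pattern.length, which bounds the
-- recursion depth (every recursive call is on a strictly shorter list).  On the
-- empty list Python A recurses forever (RecursionError); that input is outside
-- Pre_ below, and there the fuel runs out harmlessly.
def sortMarblesGo (fuel : Nat) (pattern : List String) (swaps : Int) : List String × Int :=
  match fuel with
  | 0 => (pattern, swaps)
  | Nat.succ f =>
    if pattern.length == 1 then (pattern, swaps)
    else
      let mid : Nat := pattern.length / 2
      let lr := sortMarblesGo f (PySem.List.slice pattern (some 0) (some (mid : Int))) swaps
      let rr := sortMarblesGo f (PySem.List.slice pattern (some (mid : Int)) none) lr.2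
      let pat := lr.1 ++ rr.1
      let s2 := rr.2
      -- pattern[mid] / pattern[mid-1]: a `none` would be Python's IndexError
      -- (unreachable on inputs in Pre_); we return the pair unchanged there.
      match PySem.List.pyGet? pat (mid : Int), PySem.List.pyGet? pat ((mid : Int) - 1) with
      | some a, some c =>
        if a == "w" && c == "b" then
          let st := (PySem.List.pyRange 0 (PySem.List.len (PySem.List.slice pat (some 0) (some (mid : Int)))) 1).foldl
            (fun (st : List String × Int) i =>
              match PySem.List.pyGet? pat i with
              | some x =>
                if x == "b" then
                  ((match PySem.List.remove? st.1 "b" with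
                    | some l => l
                    | none => st.1) ++ ["b"], st.2 + 1)
                else st
              | none => st) (pat, 0)
          let wCount := (PySem.List.pyRange (mid : Int) (PySem.List.len pat) 1).foldl
            (fun (w : Int) i =>
              match PySem.List.pyGet? pat i with
              | some x => if x == "w" then w + 1 else w
              | none => w) 0
          (st.1, s2 + wCount * st.2)
        else (pat, s2)
      | _, _ => (pat, s2)

def sort_marbles (pattern : List String) (swaps : Int) : List String × Int :=
  sortMarblesGo pattern.length pattern swaps

-- ===== PORT B =====
-- Source B's helper merge_seg(left, right) -> (merged segment, swap increment)
def mergeSeg (left right : List String) : List String × Int :=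
  if PySem.List.pyGet? right 0 == some "w" && PySem.List.pyGet? left (-1) == some "b" then
    let bc := PySem.List.count left "b"
    let wc := PySem.List.count right "w"
    (left.filter (fun x => x != "b") ++ right ++ List.replicate bc "b", (wc : Int) * (bc : Int))
  else (left ++ right, 0)

-- Source B's task tuples ("go", seg) / ("merge", None)
inductive PVTask : Type
  | go : List String → PVTask
  | merge : PVTask

-- Source B's while loop. The loop always terminates (every "go" task on a segment of
-- length >= 2 is replaced by strictly smaller work), and one Python iteration is one
-- step here; the port takes a fuel argument and the wrapper passes
-- fuel = 3 * len(pattern) + 1, which bounds the number of iterations (the split tree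
-- has at most 2n-1 "go" steps and n-1 "merge" steps).  Python's append/pop at the
-- right end of `tasks`/`res` becomes cons/head on Lean lists (head = top of stack).
def runB (fuel : Nat) (tasks : List PVTask) (res : List (List String)) (total : Int) :
    List (List String) × Int :=
  match fuel with
  | 0 => (res, total)
  | Nat.succ f =>
    match tasks with
    | [] => (res, total)
    | .go seg :: ts =>
      if seg.length ≤ 1 then runB f ts (seg :: res) total
      else
        let mid : Nat := seg.length / 2
        runB f (.go (PySem.List.slice seg (some 0) (some (mid : Int))) ::
                .go (PySem.List.slice seg (some (mid : Int)) none) :: .merge :: ts) res total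
    | .merge :: ts =>
      match res with
      | right :: left :: rest =>
        let m := mergeSeg left right
        runB f ts (m.1 :: rest) (total + m.2)
      | _ => (res, total)  -- unreachable: every merge task finds its two results

def sort_marbles_alt (pattern : List String) (swaps : Int) : List String × Int :=
  let r := runB (3 * pattern.length + 1) [.go pattern] [] swaps
  (r.1.headD [], r.2)  -- res[-1]: with head-as-top stacks the last appended element is the head

-- ===== PRECONDITION & SPEC =====
-- Pre_ excludes only the empty list: there Python A recurses forever (RecursionError),
-- while B's loop just returns ([], swaps).
def Pre_sort_marbles (pattern : List String) (swaps : Int) : Prop := pattern ≠ []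
instance (pattern : List String) (swaps : Int) : Decidable (Pre_sort_marbles pattern swaps) := by
  unfold Pre_sort_marbles; infer_instance

def pvWitness_sort_marbles : List String × Int := (["b", "w"], 0)

def Spec_sort_marbles (pattern : List String) (swaps : Int) (out : List String × Int) : Prop :=
  out = sort_marbles_alt pattern swaps
instance (pattern : List String) (swaps : Int) (out : List String × Int) :
    Decidable (Spec_sort_marbles pattern swaps out) := by unfold Spec_sort_marbles; infer_instance

-- ===== CLAIM (what is proved, stated in full; the proofs are below) =====
def Claim_equal_sort_marbles : Prop :=
  ∀ (pattern : List String) (swaps : Int), Dom_sort_marbles pattern swaps →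
    Pre_sort_marbles pattern swaps → Spec_sort_marbles pattern swaps (sort_marbles pattern swaps)

-- ===== LEMMAS AND PROOFS =====

-- the common recursive specification both ports compute (proof-side only)
def smF (p : List String) : List String × Int :=
  if p.length ≤ 1 then (p, 0)
  else
    let mid : Nat := p.length / 2
    let l := smF (p.take mid)
    let r := smF (p.drop mid)
    let m := mergeSeg l.1 r.1
    (m.1, l.2 + r.2 + m.2)
termination_by p.length
decreasing_by
  · simp only [List.length_take]; omega
  · simp only [List.length_drop]; omega

lemma smF_if_le (p : List String) (h : p.length ≤ 1) : smF p = (p, 0) := by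
  rw [smF]; simp [h]

lemma smF_if_gt (p : List String) (h : ¬ p.length ≤ 1) :
    smF p = ((mergeSeg (smF (p.take (p.length / 2))).1 (smF (p.drop (p.length / 2))).1).1,
             (smF (p.take (p.length / 2))).2 + (smF (p.drop (p.length / 2))).2 +
             (mergeSeg (smF (p.take (p.length / 2))).1 (smF (p.drop (p.length / 2))).1).2) := by
  rw [smF]; simp [h]

lemma filterb_count (L : List String) :
    (L.filter (fun x => x != "b")).length + List.count "b" L = L.length := by
  induction L with
  | nil => simp
  | cons x xs ih =>
    by_cases hx : x = "b"
    · subst hx; simp; omega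
    · simp [hx]; omega

lemma mergeSeg_len (L R : List String) : (mergeSeg L R).1.length = L.length + R.length := by
  unfold mergeSeg
  split
  · simp only [List.length_append, List.length_replicate, PySem.List.count_eq]
    have := filterb_count L
    omega
  · simp

lemma smF_len : ∀ (n : Nat) (p : List String), p.length ≤ n → (smF p).1.length = p.length := by
  intro n
  induction n with
  | zero => intro p h; rw [smF_if_le p (by omega)]
  | succ n ih =>
    intro p h
    by_cases hp : p.length ≤ 1
    · rw [smF_if_le p hp]
    · rw [smF_if_gt p hp]
      simp only [mergeSeg_len]
      rw [ih (p.take (p.length / 2)) (by simp; omega),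
          ih (p.drop (p.length / 2)) (by simp; omega)]
      simp; omega

lemma smF_len' (p : List String) : (smF p).1.length = p.length := smF_len p.length p le_rfl

-- A's remove/append loop body, as a function of the current pattern element
def stepA (st : List String × Int) (x : String) : List String × Int :=
  if x == "b" then
    ((match PySem.List.remove? st.1 "b" with
      | some l => l
      | none => st.1) ++ ["b"], st.2 + 1)
  else st

lemma remove_b_prefix : ∀ (F1 rest : List String), "b" ∉ F1 →
    PySem.List.remove? (F1 ++ "b" :: rest) "b" = some (F1 ++ rest) := by
  intro F1
  induction F1 with
  | nil => intro rest _; simp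
  | cons x xs ih =>
    intro rest hF
    have hx : x ≠ "b" := fun h => hF (by simp [h])
    rw [List.cons_append, PySem.List.remove?_cons_of_ne _ hx,
        ih rest (fun h => hF (by simp [h]))]
    rfl

lemma loopA_inv : ∀ (l2 F1 tail : List String) (kn : Nat) (ki : Int), "b" ∉ F1 →
    l2.foldl stepA (F1 ++ (l2 ++ (tail ++ List.replicate kn "b")), ki)
      = (F1 ++ (l2.filter (fun x => x != "b") ++
          (tail ++ List.replicate (kn + List.count "b" l2) "b")),
         ki + (List.count "b" l2 : Int)) := by
  intro l2
  induction l2 with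
  | nil => intro F1 tail kn ki hF; simp
  | cons x l2 ih =>
    intro F1 tail kn ki hF
    by_cases hx : x = "b"
    · subst hx
      rw [List.foldl_cons]
      have hstep : stepA (F1 ++ ("b" :: l2 ++ (tail ++ List.replicate kn "b")), ki) "b"
          = (F1 ++ (l2 ++ (tail ++ List.replicate (kn + 1) "b")), ki + 1) := by
        unfold stepA
        simp only [List.cons_append]
        rw [remove_b_prefix F1 (l2 ++ (tail ++ List.replicate kn "b")) hF]
        simp [List.replicate_succ' (n := kn), List.append_assoc]
      simp only [List.cons_append] at hstep ⊢
      rw [hstep, ih F1 tail (kn + 1) (ki + 1) hF]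
      simp only [List.filter_cons, List.count_cons, beq_self_eq_true, if_true,
        bne_self_eq_false, Bool.false_eq_true, if_false]
      simp only [Prod.mk.injEq]
      refine ⟨by rw [show kn + 1 + List.count "b" l2 = kn + (List.count "b" l2 + 1) from by omega], by push_cast; ring⟩
    · rw [List.foldl_cons]
      have hstep : stepA (F1 ++ (x :: l2 ++ (tail ++ List.replicate kn "b")), ki) x
          = (F1 ++ (x :: l2 ++ (tail ++ List.replicate kn "b")), ki) := by
        unfold stepA
        simp [hx]
      rw [hstep]
      have hF' : "b" ∉ F1 ++ [x] := by
        simp [hF]; exact fun h => hx h.symm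
      have := ih (F1 ++ [x]) tail kn ki hF'
      simp only [List.append_assoc, List.cons_append, List.nil_append] at this ⊢
      rw [this]
      simp [hx]
  
lemma loopA_full (L R : List String) :
    L.foldl stepA (L ++ R, 0) =
      (L.filter (fun x => x != "b") ++ R ++ List.replicate (List.count "b" L) "b",
       (List.count "b" L : Int)) := by
  have := loopA_inv L [] R 0 0 (by simp)
  simpa [List.append_assoc] using this

-- A's whole merge block equals B's merge_seg (L, R are the two recursive results)
lemma mergeA_eq (L R : List String) (hL : L ≠ []) (hR : R ≠ []) (s2 : Int) :
    (match PySem.List.pyGet? (L ++ R) (L.length : Int),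
           PySem.List.pyGet? (L ++ R) ((L.length : Int) - 1) with
     | some a, some c =>
       if a == "w" && c == "b" then
         let st := (PySem.List.pyRange 0
             (PySem.List.len (PySem.List.slice (L ++ R) (some 0) (some (L.length : Int)))) 1).foldl
           (fun (st : List String × Int) i =>
             match PySem.List.pyGet? (L ++ R) i with
             | some x =>
               if x == "b" then
                 ((match PySem.List.remove? st.1 "b" with
                   | some l => l
                   | none => st.1) ++ ["b"], st.2 + 1)
               else st
             | none => st) (L ++ R, 0)
         let wCount := (PySem.List.pyRange (L.length : Int) (PySem.List.len (L ++ R)) 1).foldl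
           (fun (w : Int) i =>
             match PySem.List.pyGet? (L ++ R) i with
             | some x => if x == "w" then w + 1 else w
             | none => w) 0
         (st.1, s2 + wCount * st.2)
       else (L ++ R, s2)
     | _, _ => (L ++ R, s2))
    = ((mergeSeg L R).1, s2 + (mergeSeg L R).2) := by
  have hLpos : 0 < L.length := List.length_pos_iff.mpr hL
  have hRpos : 0 < R.length := List.length_pos_iff.mpr hR
  have h1 : PySem.List.pyGet? (L ++ R) (L.length : Int) = R[0]? := by
    rw [PySem.List.pyGet?_natCast, List.getElem?_append_right le_rfl]
    simp
  have h2 : PySem.List.pyGet? (L ++ R) ((L.length : Int) - 1) = L.getLast? := by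
    have hcast : (L.length : Int) - 1 = ((L.length - 1 : Nat) : Int) := by omega
    rw [hcast, PySem.List.pyGet?_natCast, List.getElem?_append_left (by omega),
        List.getLast?_eq_getElem?]
  obtain ⟨a, ha⟩ : ∃ a, R[0]? = some a := ⟨R[0], (List.getElem?_eq_getElem hRpos)⟩
  obtain ⟨c, hc⟩ : ∃ c, L.getLast? = some c :=
    ⟨L.getLast hL, List.getLast?_eq_some_getLast hL⟩
  rw [h1, h2, ha, hc]
  simp only []
  unfold mergeSeg
  rw [PySem.List.pyGet?_zero, PySem.List.pyGet?_neg_one, ha, hc]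
  by_cases hg : a = "w" ∧ c = "b"
  · obtain ⟨haw, hcb⟩ := hg
    subst haw; subst hcb
    simp only [beq_self_eq_true, Bool.and_self, if_true]
    -- loop 1: the remove/append loop over the left half
    have hsl : PySem.List.slice (L ++ R) (some 0) (some (L.length : Int)) = L := by
      rw [PySem.List.slice_zero_start, PySem.List.slice_to_natCast, List.take_left]
    rw [hsl, PySem.List.len_eq]
    have hcong1 : (PySem.List.pyRange 0 (L.length : Int) 1).foldl
        (fun (st : List String × Int) i =>
          match PySem.List.pyGet? (L ++ R) i with
          | some x =>
            if x == "b" then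
              ((match PySem.List.remove? st.1 "b" with
                | some l => l
                | none => st.1) ++ ["b"], st.2 + 1)
            else st
          | none => st) (L ++ R, 0)
        = (PySem.List.pyRange 0 (L.length : Int) 1).foldl
            (fun st j => stepA st (PySem.List.pyGetD L j "")) (L ++ R, 0) := by
      refine PySem.List.foldl_congr_mem _ _ _ _ ?_
      intro acc x hx
      rw [PySem.List.mem_pyRange_one] at hx
      obtain ⟨hx0, hx1⟩ := hx
      have hget : PySem.List.pyGet? (L ++ R) x = some L[x.toNat] := by
        rw [PySem.List.pyGet?_eq_some_getElem (L ++ R) hx0 (by simp; omega)]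
        congr 1
        exact List.getElem_append_left (by omega)
      rw [hget, PySem.List.pyGetD_eq_getElem L "" hx0 (by omega)]
      simp [stepA]
    rw [hcong1, PySem.List.foldl_pyRange_zero_pyGetD' L "" stepA (L ++ R, 0), loopA_full]
    -- loop 2: counting the w's in the right half
    rw [PySem.List.len_eq]
    have hcong2 : (PySem.List.pyRange (L.length : Int) ((L ++ R).length : Int) 1).foldl
        (fun (w : Int) i =>
          match PySem.List.pyGet? (L ++ R) i with
          | some x => if x == "w" then w + 1 else w
          | none => w) 0
        = (PySem.List.pyRange (L.length : Int) ((L ++ R).length : Int) 1).foldl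
            (fun w j => (fun (w : Int) (x : String) => if x == "w" then w + 1 else w) w
              (PySem.List.pyGetD (L ++ R) j "")) 0 := by
      refine PySem.List.foldl_congr_mem _ _ _ _ ?_
      intro acc x hx
      rw [PySem.List.mem_pyRange_one] at hx
      obtain ⟨hx0, hx1⟩ := hx
      rw [PySem.List.pyGet?_eq_some_getElem (L ++ R) (by omega) hx1,
          PySem.List.pyGetD_eq_getElem (L ++ R) "" (by omega) hx1]
    have hdrop := PySem.List.foldl_pyRange_pyGetD' (L ++ R) ""
      (fun (w : Int) (x : String) => if x == "w" then w + 1 else w) 0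
      (a := (L.length : Int)) (by positivity)
    rw [hcong2, hdrop, Int.toNat_natCast, List.drop_left, PySem.List.foldl_count_if]
    simp only [PySem.List.count_eq, zero_add]
    rw [show List.countP (fun x => x == "w") R = List.count "w" R from rfl]
  · have hgb : (a == "w" && c == "b") = false := by
      by_cases haw : a = "w"
      · subst haw
        have hcb : c ≠ "b" := fun h => hg ⟨rfl, h⟩
        simp [hcb]
      · simp [haw]
    rw [hgb]
    simp [hg]

lemma sortA_eq : ∀ (fuel : Nat) (p : List String) (s : Int), p ≠ [] → p.length ≤ fuel →
    sortMarblesGo fuel p s = ((smF p).1, s + (smF p).2) := by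
  intro fuel
  induction fuel with
  | zero =>
    intro p s hne hfl
    exact absurd (List.eq_nil_of_length_eq_zero (by omega)) hne
  | succ f ih =>
    intro p s hne hfl
    by_cases h1 : p.length = 1
    · have hb : (p.length == 1) = true := by simpa using h1
      simp only [sortMarblesGo, hb, if_true]
      rw [smF_if_le p (by omega)]
      simp
    · have h2 : 2 ≤ p.length := by
        have : 0 < p.length := List.length_pos_iff.mpr hne
        omega
      have hb : (p.length == 1) = false := by simp; omega
      simp only [sortMarblesGo, hb, Bool.false_eq_true, if_false]
      have hsl : PySem.List.slice p (some 0) (some ((p.length / 2 : Nat) : Int)) =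
          p.take (p.length / 2) := by
        rw [PySem.List.slice_zero_start, PySem.List.slice_to_natCast]
      have hsr : PySem.List.slice p (some ((p.length / 2 : Nat) : Int)) none =
          p.drop (p.length / 2) := PySem.List.slice_from_natCast p _
      rw [hsl, hsr,
          ih (p.take (p.length / 2)) s
            (List.length_pos_iff.mp (by simp; omega))
            (by simp; omega),
          ih (p.drop (p.length / 2)) _
            (List.length_pos_iff.mp (by simp; omega))
            (by simp; omega)]
      have hLlen : (smF (p.take (p.length / 2))).1.length = p.length / 2 := by
        rw [smF_len']; simp; omega
      have hcast : ((p.length / 2 : Nat) : Int) =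
          ((smF (p.take (p.length / 2))).1.length : Int) := by rw [hLlen]
      rw [hcast]
      rw [mergeA_eq _ _
            (by intro h; have := hLlen; rw [h] at this; simp at this; omega)
            (by intro h
                have := smF_len' (p.drop (p.length / 2))
                rw [h] at this; simp at this; omega)]
      rw [smF_if_gt p (by omega)]
      congr 1
      ring

-- exact number of loop iterations the stack machine spends on one "go" task
def stepsF (p : List String) : Nat := if p.length = 0 then 1 else 3 * p.length - 2

lemma runB_go : ∀ (n : Nat) (p : List String) (f : Nat) (ts : List PVTask)
    (res : List (List String)) (tot : Int), p.length ≤ n →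
    runB (stepsF p + f) (.go p :: ts) res tot
      = runB f ts ((smF p).1 :: res) (tot + (smF p).2) := by
  intro n
  induction n with
  | zero =>
    intro p f ts res tot hn
    have hp : p = [] := List.eq_nil_of_length_eq_zero (by omega)
    subst hp
    rw [smF_if_le [] (by simp), show stepsF [] + f = f + 1 from by simp [stepsF]; omega]
    simp [runB]
  | succ n ih =>
    intro p f ts res tot hn
    by_cases hp : p.length ≤ 1
    · rw [smF_if_le p hp, show stepsF p + f = f + 1 from by
        simp only [stepsF]; split_ifs <;> omega]
      simp [runB, hp]
    · rw [show stepsF p + f = (3 * p.length - 3 + f) + 1 from by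
        simp only [stepsF]; split_ifs <;> omega]
      simp only [runB, if_neg hp]
      have hsl : PySem.List.slice p (some 0) (some ((p.length / 2 : Nat) : Int)) =
          p.take (p.length / 2) := by
        rw [PySem.List.slice_zero_start, PySem.List.slice_to_natCast]
      have hsr : PySem.List.slice p (some ((p.length / 2 : Nat) : Int)) none =
          p.drop (p.length / 2) := PySem.List.slice_from_natCast p _
      rw [hsl, hsr,
          show 3 * p.length - 3 + f =
            stepsF (p.take (p.length / 2)) + (stepsF (p.drop (p.length / 2)) + (f + 1)) from by
              simp only [stepsF, List.length_take, List.length_drop]; split_ifs <;> omega,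
          ih (p.take (p.length / 2)) _ _ _ _ (by simp; omega),
          ih (p.drop (p.length / 2)) _ _ _ _ (by simp; omega)]
      simp only [runB]
      rw [smF_if_gt p hp]
      congr 1
      ring

-- ===== VERDICT (by name: the statement is the Claim_ definition above) =====
theorem sort_marbles_spec : Claim_equal_sort_marbles := by
  intro pattern swaps _ hpre
  unfold Spec_sort_marbles sort_marbles sort_marbles_alt
  have hlen : 1 ≤ pattern.length := List.length_pos_iff.mpr hpre
  rw [sortA_eq pattern.length pattern swaps hpre le_rfl,
      show 3 * pattern.length + 1 = stepsF pattern + 3 from by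
        simp only [stepsF]; split_ifs <;> omega,
      runB_go pattern.length pattern 3 [] [] swaps le_rfl]
  simp [runB]
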